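-- pv_equiv track=rewrite | github.com/noushad213/LocksmithV2 | backend/main.py | detect_sequences
-- ===== SOURCE A (Python) =====
-- def detect_sequences(password):
--     pw = password.lower()
--     for i in range(len(pw) - 2):
--         a, b, c = pw[i:i+3]
--
--         if a.isalpha() and b.isalpha() and c.isalpha():
--             if ord(b) == ord(a) + 1 and ord(c) == ord(b) + 1:
--                 return True
--             if ord(b) == ord(a) - 1 and ord(c) == ord(b) - 1:
--                 return True
--
--         if a.isdigit() and b.isdigit() and c.isdigit():
--             if ord(b) == ord(a) + 1 and ord(c) == ord(b) + 1:
--                 return True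
--             if ord(b) == ord(a) - 1 and ord(c) == ord(b) - 1:
--                 return True
--
--     return False
-- ===== SOURCE B (Python) =====
-- def detect_sequences(password):
--     pw = password.lower()
--     asc = dsc = 0
--     for p, c in zip(pw, pw[1:]):
--         step = (p.isalpha() and c.isalpha()) or (p.isdigit() and c.isdigit())
--         asc = asc + 1 if step and ord(c) == ord(p) + 1 else 0
--         dsc = dsc + 1 if step and ord(c) == ord(p) - 1 else 0
--         if asc >= 2 or dsc >= 2:
--             return True
--     return False
-- ===== Notes on version B (the rewrite author's own statement) =====
-- stated objective: faster
-- what changed: Replaces A's window scan (building a 3-char slice and class-testing all three chars at every index) with a single pass over adjacent pairs that maintains two run-length counters for ascending and descending same-class steps, returning True once a run reaches length 3.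
import Mathlib
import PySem

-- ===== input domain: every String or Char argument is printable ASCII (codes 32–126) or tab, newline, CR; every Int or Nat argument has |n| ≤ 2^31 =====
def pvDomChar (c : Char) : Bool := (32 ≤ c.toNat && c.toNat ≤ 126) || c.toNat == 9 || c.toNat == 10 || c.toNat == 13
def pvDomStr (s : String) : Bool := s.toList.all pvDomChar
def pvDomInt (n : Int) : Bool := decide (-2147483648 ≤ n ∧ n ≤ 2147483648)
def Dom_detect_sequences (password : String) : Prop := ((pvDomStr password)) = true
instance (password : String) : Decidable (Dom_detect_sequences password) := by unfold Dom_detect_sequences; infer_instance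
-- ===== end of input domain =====

-- B replaces A's 3-char window scan with a single pass over adjacent pairs keeping two
-- run-length counters (alternative decomposition; same O(n) cost).

-- ===== PORT A =====
-- the body of A's loop at index i: a, b, c = pw[i:i+3] and the two sequential if-blocks
def pvHitA (a b c : Char) : Bool :=
  (PySem.Chars.isalpha a && PySem.Chars.isalpha b && PySem.Chars.isalpha c &&
    (((b.toNat : Int) == (a.toNat : Int) + 1 && (c.toNat : Int) == (b.toNat : Int) + 1) ||
     ((b.toNat : Int) == (a.toNat : Int) - 1 && (c.toNat : Int) == (b.toNat : Int) - 1))) ||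
  (PySem.Chars.isdigit a && PySem.Chars.isdigit b && PySem.Chars.isdigit c &&
    (((b.toNat : Int) == (a.toNat : Int) + 1 && (c.toNat : Int) == (b.toNat : Int) + 1) ||
     ((b.toNat : Int) == (a.toNat : Int) - 1 && (c.toNat : Int) == (b.toNat : Int) - 1)))

def detect_sequences (password : String) : Bool :=
  let pw := PySem.Chars.lower password.toList
  (PySem.List.pyRange 0 ((pw.length : Int) - 2) 1).any fun i =>
    match PySem.List.slice pw (some i) (some (i + 3)) with
    | [a, b, c] => pvHitA a b c
    | _ => false   -- unreachable: the slice has exactly 3 characters for every i in the range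

-- ===== PORT B =====
def pvStepB (p c : Char) : Bool :=
  (PySem.Chars.isalpha p && PySem.Chars.isalpha c) ||
  (PySem.Chars.isdigit p && PySem.Chars.isdigit c)

-- the pair loop of Source B: p is the previous char, asc/dsc the current run counters
def pvLoopB : List Char → Char → Nat → Nat → Bool
  | [], _, _, _ => false
  | c :: rest, p, asc, dsc =>
    let asc' := if pvStepB p c && (c.toNat : Int) == (p.toNat : Int) + 1 then asc + 1 else 0
    let dsc' := if pvStepB p c && (c.toNat : Int) == (p.toNat : Int) - 1 then dsc + 1 else 0
    if asc' ≥ 2 || dsc' ≥ 2 then true else pvLoopB rest c asc' dsc'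

def detect_sequences_alt (password : String) : Bool :=
  match PySem.Chars.lower password.toList with
  | [] => false
  | p :: rest => pvLoopB rest p 0 0

-- ===== PRECONDITION & SPEC =====
def Spec_detect_sequences (password : String) (out : Bool) : Prop := out = detect_sequences_alt password
instance (password : String) (out : Bool) : Decidable (Spec_detect_sequences password out) := by unfold Spec_detect_sequences; infer_instance

-- ===== CLAIM (what is proved, stated in full; the proofs are below) =====
def Claim_equal_detect_sequences : Prop := ∀ (password : String), Dom_detect_sequences password → Spec_detect_sequences password (detect_sequences password)

-- ===== LEMMAS AND PROOFS =====

-- reference recursion: "some 3-window of the list satisfies A's triple test"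
def pvWin3 : List Char → Bool
  | a :: b :: c :: rest => pvHitA a b c || pvWin3 (b :: c :: rest)
  | _ => false

theorem pv_alpha_digit_disj (c : Char) :
    ¬(PySem.Chars.isalpha c = true ∧ PySem.Chars.isdigit c = true) := by
  simp [PySem.Chars.isalpha, PySem.Chars.isdigit, PySem.Chars.isupper, PySem.Chars.islower,
        Char.le_def, UInt32.le_iff_toNat_le]
  omega

theorem pv_bool_key {A C x y u v : Bool} :
    (A && C && (x && y || u && v)) = (A && x && (C && y) || A && u && (C && v)) := by
  revert A C x y u v; decide

-- A's uniform-class triple test as two consecutive same-class ±1 steps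
theorem pv_hit_eq_steps (a b c : Char) :
    pvHitA a b c =
      ((pvStepB a b && (b.toNat : Int) == (a.toNat : Int) + 1) &&
       (pvStepB b c && (c.toNat : Int) == (b.toNat : Int) + 1) ||
       (pvStepB a b && (b.toNat : Int) == (a.toNat : Int) - 1) &&
       (pvStepB b c && (c.toNat : Int) == (b.toNat : Int) - 1)) := by
  have hb := pv_alpha_digit_disj b
  simp only [pvHitA, pvStepB]
  cases hab : PySem.Chars.isalpha b <;> cases hdb : PySem.Chars.isdigit b <;>
    simp_all <;> exact pv_bool_key

-- the loop invariant: pvLoopB fires on the first-step hit allowed by the incoming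
-- counters, or on any later 3-window of p :: rest
theorem pv_loopB_spec (rest : List Char) (p : Char) (a d : Nat) :
    pvLoopB rest p a d =
      ((match rest with
        | c :: _ =>
            (decide (1 ≤ a) && (pvStepB p c && (c.toNat : Int) == (p.toNat : Int) + 1)) ||
            (decide (1 ≤ d) && (pvStepB p c && (c.toNat : Int) == (p.toNat : Int) - 1))
        | [] => false) || pvWin3 (p :: rest)) := by
  induction rest generalizing p a d with
  | nil => simp [pvLoopB, pvWin3]
  | cons c rest ih =>
    match rest with
    | [] =>
      simp only [pvLoopB]
      cases h1 : pvStepB p c && (c.toNat : Int) == (p.toNat : Int) + 1 <;>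
      cases h2 : pvStepB p c && (c.toNat : Int) == (p.toNat : Int) - 1 <;>
        simp [pvWin3]
    | c2 :: rest' =>
      conv_lhs => rw [pvLoopB]
      rw [ih]
      rw [show pvWin3 (p :: c :: c2 :: rest') = (pvHitA p c c2 || pvWin3 (c :: c2 :: rest')) from rfl,
          pv_hit_eq_steps]
      cases h1 : pvStepB p c && (c.toNat : Int) == (p.toNat : Int) + 1 <;>
      cases h2 : pvStepB p c && (c.toNat : Int) == (p.toNat : Int) - 1 <;>
        simp [h1, h2]

theorem pv_slice_shift (x : Char) (xs : List Char) (k : Nat) :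
    PySem.List.slice (x :: xs) (some ((k : Int) + 1)) (some ((k : Int) + 1 + 3)) =
      PySem.List.slice xs (some (k : Int)) (some ((k : Int) + 3)) := by
  rw [PySem.List.slice_toNat (x :: xs) (by omega) (by omega),
      PySem.List.slice_toNat xs (by omega) (by omega)]
  have h1 : ((k : Int) + 1).toNat = k + 1 := by omega
  have h2 : ((k : Int) + 1 + 3).toNat = k + 4 := by omega
  have h3 : ((k : Int)).toNat = k := by omega
  have h4 : ((k : Int) + 3).toNat = k + 3 := by omega
  rw [h1, h2, h3, h4, List.drop_succ_cons]
  congr 1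
  omega

-- A's index loop over pw equals the structural window recursion
theorem pv_A_eq_win3 (pw : List Char) :
    ((PySem.List.pyRange 0 ((pw.length : Int) - 2) 1).any fun i =>
      match PySem.List.slice pw (some i) (some (i + 3)) with
      | [a, b, c] => pvHitA a b c
      | _ => false) = pvWin3 pw := by
  induction pw using pvWin3.induct with
  | case1 a b c rest ih =>
    rw [show ((a :: b :: c :: rest).length : Int) - 2 = ((rest.length + 1 : Nat) : Int) by
          simp; ring]
    rw [show ((b :: c :: rest).length : Int) - 2 = ((rest.length : Nat) : Int) by
          simp; ring] at ih
    rw [PySem.List.pyRange_zero_nat] at ih ⊢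
    rw [List.range_succ_eq_map]
    rw [List.any_map] at ih
    simp only [List.any_cons, List.any_map, Function.comp]
    rw [show pvWin3 (a :: b :: c :: rest) = (pvHitA a b c || pvWin3 (b :: c :: rest)) from rfl]
    congr 1
    rw [← ih]
    apply List.any_congr rfl
    intro k
    simp only [Function.comp_apply, Nat.succ_eq_add_one]
    rw [show ((k + 1 : Nat) : Int) = (k : Int) + 1 by push_cast; ring]
    rw [pv_slice_shift]
  | case2 t h =>
    rcases t with _ | ⟨a, _ | ⟨b, _ | ⟨c, r⟩⟩⟩
    · rw [PySem.List.pyRange_one_eq_nil (by norm_num)]; rfl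
    · rw [PySem.List.pyRange_one_eq_nil (by norm_num)]; rfl
    · rw [PySem.List.pyRange_one_eq_nil (by norm_num)]; rfl
    · exact absurd rfl (fun hh => h a b c r hh)

-- ===== VERDICT (by name: the statement is the Claim_ definition above) =====
theorem detect_sequences_spec : Claim_equal_detect_sequences := by
  intro password _
  unfold Spec_detect_sequences detect_sequences detect_sequences_alt
  rw [pv_A_eq_win3]
  cases h : PySem.Chars.lower password.toList with
  | nil => rfl
  | cons p rest =>
    show pvWin3 (p :: rest) = pvLoopB rest p 0 0
    rw [pv_loopB_spec]
    cases rest <;> simp
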